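-- pv_equiv track=rewrite | github.com/tikhonovpavel/reasoning-probing | analyze_answer_switching.py | find_first_change_index
-- ===== SOURCE A (Python) =====
-- from typing import Optional, List
--
-- def find_first_change_index(predictions: List[Optional[str]]) -> Optional[int]:
--     last_pred = None
--     for i, pred in enumerate(predictions):
--         if pred and pred in "ABCD":
--             if last_pred is None:
--                 last_pred = pred
--             elif pred != last_pred:
--                 return i
--     return None
-- ===== SOURCE B (Python) =====
-- from typing import Optional, List
--
-- def find_first_change_index(predictions: List[Optional[str]]) -> Optional[int]:
--     # Pass 1: the reference is the first valid prediction (if any).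
--     ref = next((p for p in predictions if p and p in "ABCD"), None)
--     if ref is None:
--         return None
--     # Pass 2: first index holding a valid prediction different from the reference.
--     # Any valid prediction before that point equals ref, so no index bookkeeping is needed.
--     return next((i for i, p in enumerate(predictions) if p and p in "ABCD" and p != ref), None)
-- ===== Notes on version B (the rewrite author's own statement) =====
-- stated objective: alternative
-- what changed: Replaces the stateful single pass carrying a last_pred accumulator by two independent stateless scans of the input: one to pick the first valid value as reference, one to find the first index whose valid value differs from it (correct because every valid entry before that index equals the reference).
import Mathlib
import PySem

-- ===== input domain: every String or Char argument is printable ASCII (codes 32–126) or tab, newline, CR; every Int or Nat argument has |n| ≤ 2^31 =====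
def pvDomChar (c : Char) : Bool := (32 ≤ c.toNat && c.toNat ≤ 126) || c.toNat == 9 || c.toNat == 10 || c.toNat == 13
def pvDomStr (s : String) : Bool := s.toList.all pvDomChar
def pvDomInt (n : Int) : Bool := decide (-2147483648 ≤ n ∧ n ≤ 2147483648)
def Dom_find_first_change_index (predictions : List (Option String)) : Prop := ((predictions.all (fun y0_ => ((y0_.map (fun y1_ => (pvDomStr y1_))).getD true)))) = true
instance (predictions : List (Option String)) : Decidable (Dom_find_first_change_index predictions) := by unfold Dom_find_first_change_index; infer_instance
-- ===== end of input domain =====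

-- B replaces A's stateful single pass (last_pred accumulator) by two independent stateless scans:
-- pick the first valid value as reference, then find the first index whose valid value differs (alternative decomposition, same cost).

-- ===== PORT A =====
-- A's loop: state last_pred; the early `return i` becomes a returned `some i`
def ffciLoopA : List (Int × Option String) → Option String → Option Int
  | [], _ => none
  | (i, pred) :: rest, last =>
    match pred with
    | some s =>
      if decide (s ≠ "") && PySem.Str.isIn s "ABCD" then
        match last with
        | none => ffciLoopA rest (some s)
        | some lp => if s ≠ lp then some i else ffciLoopA rest (some lp)
      else ffciLoopA rest last
    | none => ffciLoopA rest last

def find_first_change_index (predictions : List (Option String)) : Option Int :=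
  ffciLoopA (PySem.List.enumerate predictions) none

-- ===== PORT B =====
-- the `p and p in "ABCD"` validity test of B's two generator conditions
def ffciValid (p : Option String) : Bool :=
  match p with
  | some s => decide (s ≠ "") && PySem.Str.isIn s "ABCD"
  | none => false

def find_first_change_index_alt (predictions : List (Option String)) : Option Int :=
  match predictions.find? ffciValid with
  | none => none
  | some ref =>
    ((PySem.List.enumerate predictions).find? (fun p => ffciValid p.2 && p.2 ≠ ref)).map (·.1)

-- ===== PRECONDITION & SPEC =====
def Spec_find_first_change_index (predictions : List (Option String)) (out : Option Int) : Prop := out = find_first_change_index_alt predictions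
instance (predictions : List (Option String)) (out : Option Int) : Decidable (Spec_find_first_change_index predictions out) := by unfold Spec_find_first_change_index; infer_instance

-- ===== CLAIM (what is proved, stated in full; the proofs are below) =====
def Claim_equal_find_first_change_index : Prop := ∀ (predictions : List (Option String)), Dom_find_first_change_index predictions → Spec_find_first_change_index predictions (find_first_change_index predictions)

-- ===== LEMMAS AND PROOFS =====

-- once a reference is fixed, A's loop is B's second scan restricted to the remaining pairs
theorem ffciLoopA_some (l : List (Int × Option String)) (lp : String) :
    ffciLoopA l (some lp) =
      (l.find? (fun p => ffciValid p.2 && p.2 ≠ some lp)).map (·.1) := by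
  induction l with
  | nil => rfl
  | cons hd tl ih =>
    obtain ⟨i, pred⟩ := hd
    match pred with
    | none => simpa only [ffciLoopA, List.find?_cons, ffciValid, Bool.false_and,
        Bool.false_eq_true, if_false] using ih
    | some s =>
      by_cases hv : (decide (s ≠ "") && PySem.Str.isIn s "ABCD") = true
      · by_cases hne : s = lp
        · subst hne
          simp only [ffciLoopA, hv, if_true, List.find?_cons, ffciValid]
          simp only [ih]; simp [ffciValid]
        · simp only [ffciLoopA, hv, if_true, if_pos hne, List.find?_cons, ffciValid]
          simp [hne]
      · rw [Bool.not_eq_true] at hv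
        simpa only [ffciLoopA, hv, Bool.false_eq_true, if_false, List.find?_cons,
          ffciValid, Bool.false_and] using ih

-- before any valid entry: A's loop equals the two-scan form over the pair list
theorem ffciLoopA_none (l : List (Int × Option String)) :
    ffciLoopA l none =
      (match l.find? (fun p => ffciValid p.2) with
       | none => none
       | some r => (l.find? (fun p => ffciValid p.2 && p.2 ≠ r.2)).map (·.1)) := by
  induction l with
  | nil => rfl
  | cons hd tl ih =>
    obtain ⟨i, pred⟩ := hd
    match pred with
    | none => simpa only [ffciLoopA, List.find?_cons, ffciValid, Bool.false_eq_true,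
        if_false, Bool.false_and] using ih
    | some s =>
      by_cases hv : (decide (s ≠ "") && PySem.Str.isIn s "ABCD") = true
      · simp only [ffciLoopA, hv, if_true, List.find?_cons, ffciValid]
        simp only [ffciLoopA_some]; simp [ffciValid]
      · rw [Bool.not_eq_true] at hv
        simpa only [ffciLoopA, hv, Bool.false_eq_true, if_false, List.find?_cons,
          ffciValid, Bool.false_and] using ih

-- B's first scan runs over the values; relate it to find? over the enumerated pairs
theorem find?_enumerate_snd (xs : List (Option String)) (n : Int) :
    ((PySem.List.enumerate xs n).find? (fun p => ffciValid p.2)).map (·.2) = xs.find? ffciValid := by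
  induction xs generalizing n with
  | nil => rfl
  | cons x xs ih =>
    rw [PySem.List.enumerate_cons]
    by_cases hx : ffciValid x = true
    · simp [hx]
    · rw [Bool.not_eq_true] at hx
      simp [hx, ih]

-- ===== VERDICT (by name: the statement is the Claim_ definition above) =====
theorem find_first_change_index_spec : Claim_equal_find_first_change_index := by
  intro predictions _
  unfold Spec_find_first_change_index find_first_change_index find_first_change_index_alt
  rw [ffciLoopA_none, ← find?_enumerate_snd predictions 0]
  cases h : (PySem.List.enumerate predictions 0).find? (fun p => ffciValid p.2) with
  | none => rfl
  | some r => rfl
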